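-- pv_equiv track=rewrite | github.com/avneesh99/firestore_stream | core/sharing_story_functions/fan_out_functions.py | ReturnRange
-- ===== SOURCE A (Python) =====
-- def ReturnRange(category: str, mappingDict: dict, rangeDict: dict) -> dict:
--     if category.lower() == 'home':
--         return rangeDict
--
--     for topic, subTopicDict in mappingDict.items():
--         for subTopic, coordinateDict in subTopicDict.items():
--             if subTopic.lower() == category.lower():
--                 newRangeDict = {
--                     'minX': coordinateDict['x'],
--                     'minY': coordinateDict['y'],
--                     'maxX': coordinateDict['x'] + coordinateDict['width'],
--                     'maxY': coordinateDict['y'] + coordinateDict['height']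
--                 }
--
--                 if not rangeDict:
--                     rangeDict = newRangeDict
--                 else:
--                     height = coordinateDict['height']
--                     width = coordinateDict['width']
--
--                     rangeDict = {
--                         'minX': newRangeDict['minX'] + rangeDict['minX'] * width,
--                         'minY': newRangeDict['minY'] + rangeDict['minY'] * height,
--                         'maxX': newRangeDict['minX'] + rangeDict['minX'] * width + width * (
--                                 rangeDict['maxX'] - rangeDict['minX']),
--                         'maxY': newRangeDict['minY'] + rangeDict['minY'] * height + height * (
--                                 rangeDict['maxY'] - rangeDict['minY']),
--                     }
--
--                 return ReturnRange(topic, mappingDict, rangeDict)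
-- ===== SOURCE B (Python) =====
-- def ReturnRange(category: str, mappingDict: dict, rangeDict: dict) -> dict:
--     # Build a first-occurrence index: lowered subtopic -> (topic, coordinateDict).
--     index = {}
--     for topic, subTopicDict in mappingDict.items():
--         for subTopic, coordinateDict in subTopicDict.items():
--             key = subTopic.lower()
--             if key not in index:
--                 index[key] = (topic, coordinateDict)
--
--     # Compose the per-step affine maps x -> c['x'] + width*x (and same for y)
--     # in one pass, then apply the composite once at the end.
--     ax, bx, ay, by = 1, 0, 1, 0
--     stepped = False
--     current = category
--     while current.lower() != 'home':
--         hit = index.get(current.lower())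
--         if hit is None:
--             return None
--         topic, c = hit
--         ax, bx = c['width'] * ax, c['x'] + c['width'] * bx
--         ay, by = c['height'] * ay, c['y'] + c['height'] * by
--         stepped = True
--         current = topic
--
--     if not stepped:
--         return rangeDict
--     if rangeDict:
--         mnx, mny = rangeDict['minX'], rangeDict['minY']
--         mxx, mxy = rangeDict['maxX'], rangeDict['maxY']
--     else:
--         mnx, mny, mxx, mxy = 0, 0, 1, 1
--     return {'minX': ax * mnx + bx, 'minY': ay * mny + by,
--             'maxX': ax * mxx + bx, 'maxY': ay * mxy + by}
-- ===== Notes on version B (the rewrite author's own statement) =====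
-- stated objective: faster
-- what changed: A's tail recursion rescans the nested topic/subtopic dicts on every step and rewrites the whole rectangle each time; B builds a first-occurrence index (lowered subtopic -> (topic, coordinates)) once, then only composes the per-step affine maps x -> c['x']+width*x, y -> c['y']+height*y along the chain and applies the composite to the initial rectangle (or the unit square) once at the end.
import Mathlib
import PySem

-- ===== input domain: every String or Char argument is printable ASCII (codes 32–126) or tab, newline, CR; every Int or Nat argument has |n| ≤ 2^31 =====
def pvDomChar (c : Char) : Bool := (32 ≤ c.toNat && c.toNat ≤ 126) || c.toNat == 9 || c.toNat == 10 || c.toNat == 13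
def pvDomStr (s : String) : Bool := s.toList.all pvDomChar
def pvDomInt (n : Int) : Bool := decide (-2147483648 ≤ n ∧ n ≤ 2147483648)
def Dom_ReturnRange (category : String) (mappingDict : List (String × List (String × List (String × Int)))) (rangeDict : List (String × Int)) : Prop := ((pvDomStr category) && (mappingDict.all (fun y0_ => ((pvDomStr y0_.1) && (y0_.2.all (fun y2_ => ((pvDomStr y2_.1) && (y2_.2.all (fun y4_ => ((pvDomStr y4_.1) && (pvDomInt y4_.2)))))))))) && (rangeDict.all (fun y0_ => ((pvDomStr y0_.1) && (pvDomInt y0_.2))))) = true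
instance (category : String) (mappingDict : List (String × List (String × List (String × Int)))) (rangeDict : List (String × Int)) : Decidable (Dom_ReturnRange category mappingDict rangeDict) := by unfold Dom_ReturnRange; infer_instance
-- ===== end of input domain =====

-- B replaces A's tail recursion with nested dict scans by a first-occurrence index built once
-- plus a single composed affine transform applied at the end (objective: alternative algorithm).

-- ===== PORT A =====
-- first-match lookup in an association list with default (Python d[k]; Pre_ guarantees the key
-- is present wherever A reads one, so the default 0 is never the returned Python value)
def pvLookInt : List (String × Int) → String → Int
  | [], _ => 0
  | (k, v) :: rest, key => if k = key then v else pvLookInt rest key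

-- inner 'for subTopic, coordinateDict in subTopicDict.items(): if subTopic.lower() == category.lower()'
def pvFindSubA (catL : String) : List (String × List (String × Int)) → Option (List (String × Int))
  | [] => none
  | (s, c) :: rest => if PySem.Str.lower s = catL then some c else pvFindSubA catL rest

-- outer 'for topic, subTopicDict in mappingDict.items()'
def pvFindA (catL : String) : List (String × List (String × List (String × Int))) → Option (String × List (String × Int))
  | [] => none
  | (topic, subs) :: rest =>
    match pvFindSubA catL subs with
    | some c => some (topic, c)
    | none => pvFindA catL rest

-- the loop body: newRangeDict and the updated rangeDict, formulas verbatim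
def pvStepA (c : List (String × Int)) (r : List (String × Int)) : List (String × Int) :=
  let x := pvLookInt c "x"
  let y := pvLookInt c "y"
  let newR : List (String × Int) :=
    [("minX", x), ("minY", y), ("maxX", x + pvLookInt c "width"), ("maxY", y + pvLookInt c "height")]
  if r.isEmpty then newR
  else
    let height := pvLookInt c "height"
    let width := pvLookInt c "width"
    [("minX", pvLookInt newR "minX" + pvLookInt r "minX" * width),
     ("minY", pvLookInt newR "minY" + pvLookInt r "minY" * height),
     ("maxX", pvLookInt newR "minX" + pvLookInt r "minX" * width + width * (pvLookInt r "maxX" - pvLookInt r "minX")),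
     ("maxY", pvLookInt newR "minY" + pvLookInt r "minY" * height + height * (pvLookInt r "maxY" - pvLookInt r "minY"))]

-- A's self-recursion, with fuel: under Pre_ (acyclic topic graph) the chain visits pairwise
-- distinct lowered topic names, so mappingDict.length + 2 calls always suffice and fuel never
-- runs out; fuel 0 is only reachable outside Pre_.
def pvGoA : Nat → String → List (String × List (String × List (String × Int))) → List (String × Int) → Option (List (String × Int))
  | 0, _, _, _ => none
  | fuel + 1, cat, m, r =>
    if PySem.Str.lower cat = "home" then some r
    else
      match pvFindA (PySem.Str.lower cat) m with
      | none => none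
      | some (topic, c) => pvGoA fuel topic m (pvStepA c r)

def ReturnRange (category : String) (mappingDict : List (String × List (String × List (String × Int)))) (rangeDict : List (String × Int)) : Option (List (String × Int)) :=
  pvGoA (mappingDict.length + 2) category mappingDict rangeDict

-- ===== PORT B =====
-- index lookup: lowered subtopic name -> (topic, coordinateDict), first occurrence wins
def pvIdxLook : List (String × (String × List (String × Int))) → String → Option (String × List (String × Int))
  | [], _ => none
  | (k, v) :: rest, key => if k = key then some v else pvIdxLook rest key

-- 'if key not in index: index[key] = (topic, coordinateDict)' over all pairs, built once
def pvBuildIdx (m : List (String × List (String × List (String × Int)))) : List (String × (String × List (String × Int))) :=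
  m.foldl (fun idx p =>
    p.2.foldl (fun idx q =>
      let key := PySem.Str.lower q.1
      if (pvIdxLook idx key).isSome then idx else idx ++ [(key, (p.1, q.2))]) idx) []

-- the while loop: compose the affine maps x ↦ c['x'] + width·x, y ↦ c['y'] + height·y
def pvGoB : Nat → List (String × (String × List (String × Int))) → String → Bool → Int → Int → Int → Int → Option (Bool × Int × Int × Int × Int)
  | 0, _, _, _, _, _, _, _ => none
  | fuel + 1, idx, cur, stepped, ax, bx, ay, byy =>
    if PySem.Str.lower cur = "home" then some (stepped, ax, bx, ay, byy)
    else
      match pvIdxLook idx (PySem.Str.lower cur) with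
      | none => none
      | some (topic, c) =>
        pvGoB fuel idx topic true
          (pvLookInt c "width" * ax) (pvLookInt c "x" + pvLookInt c "width" * bx)
          (pvLookInt c "height" * ay) (pvLookInt c "y" + pvLookInt c "height" * byy)

def ReturnRange_alt (category : String) (mappingDict : List (String × List (String × List (String × Int)))) (rangeDict : List (String × Int)) : Option (List (String × Int)) :=
  match pvGoB (mappingDict.length + 2) (pvBuildIdx mappingDict) category false 1 0 1 0 with
  | none => none
  | some (stepped, ax, bx, ay, byy) =>
    if stepped then
      let mnx := if rangeDict.isEmpty then (0 : Int) else pvLookInt rangeDict "minX"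
      let mny := if rangeDict.isEmpty then (0 : Int) else pvLookInt rangeDict "minY"
      let mxx := if rangeDict.isEmpty then (1 : Int) else pvLookInt rangeDict "maxX"
      let mxy := if rangeDict.isEmpty then (1 : Int) else pvLookInt rangeDict "maxY"
      some [("minX", ax * mnx + bx), ("minY", ay * mny + byy),
            ("maxX", ax * mxx + bx), ("maxY", ay * mxy + byy)]
    else some rangeDict

-- ===== PRECONDITION & SPEC =====
-- helpers for Pre_: the topic graph (lowered subtopic name → lowered topic name, sources 'home'
-- dropped since the chain stops there) and bounded reachability over it
def pvEdges (m : List (String × List (String × List (String × Int)))) : List (String × String) :=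
  (m.flatMap (fun p => p.2.map (fun q => (PySem.Str.lower q.1, PySem.Str.lower p.1)))).filter
    (fun e => decide (e.1 ≠ "home"))

def pvStepSet (es : List (String × String)) (S : List String) : List String :=
  es.foldl (fun S e => if e.1 ∈ S ∧ ¬ e.2 ∈ S then S ++ [e.2] else S) S

def pvReach (es : List (String × String)) : Nat → List String → List String
  | 0, S => S
  | n + 1, S => pvReach es n (pvStepSet es S)

def pvHasKeys (c : List (String × Int)) (ks : List String) : Prop :=
  ∀ k ∈ ks, k ∈ c.map (·.1)

-- Pre_ excludes (a) duplicate keys in any of the dict-valued arguments (not representable by a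
-- real Python dict), (b) inputs on which a cycle of the topic graph is reachable from the
-- lowered category (A recurses forever there, RecursionError; conservative: the deterministic
-- first-match chain may exit before entering the cycle, so a few inputs on which A returns are
-- also excluded), and (c) KeyError inputs: a coordinateDict lacking one of x/y/width/height
-- while its lowered subtopic name is reachable from the category (conservative: such a subtopic
-- may still never be the first match), and a nonempty rangeDict lacking one of
-- minX/minY/maxX/maxY when A's first step fires (this last condition is exact).
def Pre_ReturnRange (category : String) (mappingDict : List (String × List (String × List (String × Int)))) (rangeDict : List (String × Int)) : Prop :=
  (mappingDict.map (·.1)).Nodup ∧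
  (∀ p ∈ mappingDict, (p.2.map (·.1)).Nodup ∧ ∀ q ∈ p.2, (q.2.map (·.1)).Nodup) ∧
  (rangeDict.map (·.1)).Nodup ∧
  (∀ e ∈ pvEdges mappingDict,
      e.1 ∈ pvReach (pvEdges mappingDict) (pvEdges mappingDict).length [PySem.Str.lower category] →
      ¬ e.1 ∈ pvReach (pvEdges mappingDict) (pvEdges mappingDict).length [e.2]) ∧
  (∀ p ∈ mappingDict, ∀ q ∈ p.2,
      PySem.Str.lower q.1 ∈ pvReach (pvEdges mappingDict) (pvEdges mappingDict).length [PySem.Str.lower category] →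
      pvHasKeys q.2 ["x", "y", "width", "height"]) ∧
  ((¬ PySem.Str.lower category = "home" ∧ rangeDict ≠ [] ∧
      (∃ p ∈ mappingDict, ∃ q ∈ p.2, PySem.Str.lower q.1 = PySem.Str.lower category)) →
    pvHasKeys rangeDict ["minX", "minY", "maxX", "maxY"])

instance (category : String) (mappingDict : List (String × List (String × List (String × Int)))) (rangeDict : List (String × Int)) : Decidable (Pre_ReturnRange category mappingDict rangeDict) := by
  unfold Pre_ReturnRange pvHasKeys; infer_instance

def pvWitness_ReturnRange : String × (List (String × List (String × List (String × Int)))) × (List (String × Int)) :=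
  ("a", [("home", [("a", [("x", 1), ("y", 2), ("width", 3), ("height", 4)])])], [])

def Spec_ReturnRange (category : String) (mappingDict : List (String × List (String × List (String × Int)))) (rangeDict : List (String × Int)) (out : Option (List (String × Int))) : Prop := out = ReturnRange_alt category mappingDict rangeDict
instance (category : String) (mappingDict : List (String × List (String × List (String × Int)))) (rangeDict : List (String × Int)) (out : Option (List (String × Int))) : Decidable (Spec_ReturnRange category mappingDict rangeDict out) := by unfold Spec_ReturnRange; infer_instance

-- ===== CLAIM (what is proved, stated in full; the proofs are below) =====
def Claim_equal_ReturnRange : Prop := ∀ (category : String) (mappingDict : List (String × List (String × List (String × Int)))) (rangeDict : List (String × Int)), Dom_ReturnRange category mappingDict rangeDict → Pre_ReturnRange category mappingDict rangeDict → Spec_ReturnRange category mappingDict rangeDict (ReturnRange category mappingDict rangeDict)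

-- ===== LEMMAS AND PROOFS =====

theorem pvIdxLook_append (acc : List (String × (String × List (String × Int)))) (j : String) (v : String × List (String × Int)) (k : String) :
    pvIdxLook (acc ++ [(j, v)]) k =
      match pvIdxLook acc k with
      | some w => some w
      | none => if j = k then some v else none := by
  induction acc with
  | nil => simp [pvIdxLook]
  | cons p rest ih =>
    obtain ⟨k', v'⟩ := p
    by_cases h : k' = k <;> simp [pvIdxLook, h, ih]

theorem pvIdxLook_inner (topic : String) (k : String) :
    ∀ (subs : List (String × List (String × Int))) (acc : List (String × (String × List (String × Int)))),
    pvIdxLook (subs.foldl (fun idx q =>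
        let key := PySem.Str.lower q.1
        if (pvIdxLook idx key).isSome then idx else idx ++ [(key, (topic, q.2))]) acc) k =
      match pvIdxLook acc k with
      | some w => some w
      | none => (pvFindSubA k subs).map (fun c => (topic, c)) := by
  intro subs
  induction subs with
  | nil => intro acc; cases h : pvIdxLook acc k <;> simp [pvFindSubA, h]
  | cons q rest ih =>
    intro acc
    simp only [List.foldl_cons]
    cases hk : pvIdxLook acc (PySem.Str.lower q.1) with
    | some w =>
      simp only [Option.isSome_some, if_true]
      rw [ih]
      by_cases he : PySem.Str.lower q.1 = k
      · subst he
        simp [hk]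
      · simp [pvFindSubA, he]
    | none =>
      simp only [Option.isSome_none, Bool.false_eq_true, if_false]
      rw [ih, pvIdxLook_append]
      by_cases he : PySem.Str.lower q.1 = k
      · subst he
        rw [hk]
        simp [pvFindSubA]
      · simp only [pvFindSubA, if_neg he]
        cases h2 : pvIdxLook acc k <;> simp

theorem pvIdxLook_build (m : List (String × List (String × List (String × Int)))) (k : String) :
    pvIdxLook (pvBuildIdx m) k = pvFindA k m := by
  unfold pvBuildIdx
  suffices h : ∀ (ms : List (String × List (String × List (String × Int)))) (acc : List (String × (String × List (String × Int)))),
      pvIdxLook (ms.foldl (fun idx p =>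
        p.2.foldl (fun idx q =>
          let key := PySem.Str.lower q.1
          if (pvIdxLook idx key).isSome then idx else idx ++ [(key, (p.1, q.2))]) idx) acc) k =
        match pvIdxLook acc k with
        | some w => some w
        | none => pvFindA k ms by
    rw [h m []]; simp [pvIdxLook]
  intro ms
  induction ms with
  | nil => intro acc; cases h : pvIdxLook acc k <;> simp [pvFindA, h]
  | cons p rest ih =>
    intro acc
    simp only [List.foldl_cons]
    rw [ih, pvIdxLook_inner]
    cases h : pvIdxLook acc k with
    | some w => simp
    | none =>
      simp only []
      cases hf : pvFindSubA k p.2 <;> simp [pvFindA, hf]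

-- the abstract rectangle the composed affine map (ax,bx,ay,byy) produces from the base rectangle
def pvApply (mnx mny mxx mxy ax bx ay byy : Int) : List (String × Int) :=
  [("minX", ax * mnx + bx), ("minY", ay * mny + byy), ("maxX", ax * mxx + bx), ("maxY", ay * mxy + byy)]

def pvFin (mnx mny mxx mxy : Int) : Option (Bool × Int × Int × Int × Int) → Option (List (String × Int))
  | none => none
  | some (_, ax, bx, ay, byy) => some (pvApply mnx mny mxx mxy ax bx ay byy)

theorem pvStepA_apply (c : List (String × Int)) (mnx mny mxx mxy ax bx ay byy : Int) :
    pvStepA c (pvApply mnx mny mxx mxy ax bx ay byy) =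
      pvApply mnx mny mxx mxy
        (pvLookInt c "width" * ax) (pvLookInt c "x" + pvLookInt c "width" * bx)
        (pvLookInt c "height" * ay) (pvLookInt c "y" + pvLookInt c "height" * byy) := by
  simp [pvStepA, pvApply, pvLookInt]
  and_intros <;> ring

theorem pvGo_main (m : List (String × List (String × List (String × Int)))) (mnx mny mxx mxy : Int) :
    ∀ (fuel : Nat) (cur : String) (ax bx ay byy : Int),
    pvGoA fuel cur m (pvApply mnx mny mxx mxy ax bx ay byy) =
      pvFin mnx mny mxx mxy (pvGoB fuel (pvBuildIdx m) cur true ax bx ay byy) := by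
  intro fuel
  induction fuel with
  | zero => intro cur ax bx ay byy; simp [pvGoA, pvGoB, pvFin]
  | succ n ih =>
    intro cur ax bx ay byy
    simp only [pvGoA, pvGoB, pvIdxLook_build]
    by_cases hh : PySem.Str.lower cur = "home"
    · simp [hh, pvFin]
    · simp only [hh, if_neg, not_false_iff]
      cases hf : pvFindA (PySem.Str.lower cur) m with
      | none => simp [pvFin]
      | some tc =>
        obtain ⟨topic, c⟩ := tc
        simp only []
        rw [pvStepA_apply, ih]

theorem pvGoB_flag_true (idx : List (String × (String × List (String × Int)))) :
    ∀ (fuel : Nat) (cur : String) (ax bx ay byy : Int) (st : Bool × Int × Int × Int × Int),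
    pvGoB fuel idx cur true ax bx ay byy = some st → st.1 = true := by
  intro fuel
  induction fuel with
  | zero => intro cur ax bx ay byy st h; simp [pvGoB] at h
  | succ n ih =>
    intro cur ax bx ay byy st h
    simp only [pvGoB] at h
    by_cases hh : PySem.Str.lower cur = "home"
    · simp [hh] at h; simp [← h]
    · simp only [hh, if_neg, not_false_iff] at h
      cases hf : pvIdxLook idx (PySem.Str.lower cur) with
      | none => simp [hf] at h
      | some tc => rw [hf] at h; exact ih _ _ _ _ _ _ h

theorem pvGo_start (fuel : Nat) (cur : String) (m : List (String × List (String × List (String × Int)))) (r : List (String × Int)) :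
    pvGoA fuel cur m r =
      (match pvGoB fuel (pvBuildIdx m) cur false 1 0 1 0 with
       | none => none
       | some (stepped, ax, bx, ay, byy) =>
         if stepped then
           pvFin (if r.isEmpty then 0 else pvLookInt r "minX")
                 (if r.isEmpty then 0 else pvLookInt r "minY")
                 (if r.isEmpty then 1 else pvLookInt r "maxX")
                 (if r.isEmpty then 1 else pvLookInt r "maxY")
                 (some (true, ax, bx, ay, byy))
         else some r) := by
  cases fuel with
  | zero => simp [pvGoA, pvGoB]
  | succ n =>
    simp only [pvGoA, pvGoB, pvIdxLook_build]
    by_cases hh : PySem.Str.lower cur = "home"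
    · simp [hh]
    · simp only [hh, if_neg, not_false_iff]
      cases hf : pvFindA (PySem.Str.lower cur) m with
      | none => simp
      | some tc =>
        obtain ⟨topic, c⟩ := tc
        simp only []
        have hstep : pvStepA c r =
            pvApply (if r.isEmpty then 0 else pvLookInt r "minX")
                    (if r.isEmpty then 0 else pvLookInt r "minY")
                    (if r.isEmpty then 1 else pvLookInt r "maxX")
                    (if r.isEmpty then 1 else pvLookInt r "maxY")
                    (pvLookInt c "width" * 1) (pvLookInt c "x" + pvLookInt c "width" * 0)
                    (pvLookInt c "height" * 1) (pvLookInt c "y" + pvLookInt c "height" * 0) := by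
          by_cases he : r.isEmpty
          · simp [pvStepA, pvApply, he]
            and_intros <;> ring
          · simp [pvStepA, pvApply, he, pvLookInt]
            and_intros <;> ring
        rw [hstep, pvGo_main]
        cases hg : pvGoB n (pvBuildIdx m) topic true (pvLookInt c "width" * 1) (pvLookInt c "x" + pvLookInt c "width" * 0) (pvLookInt c "height" * 1) (pvLookInt c "y" + pvLookInt c "height" * 0) with
        | none => simp [pvFin]
        | some st =>
          have hb : st.1 = true := pvGoB_flag_true _ _ _ _ _ _ _ _ hg
          obtain ⟨b, ax, bx, ay, byy⟩ := st
          simp at hb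
          subst hb
          simp [pvFin]

-- ===== VERDICT (by name: the statement is the Claim_ definition above) =====
theorem ReturnRange_spec : Claim_equal_ReturnRange := by
  intro category mappingDict rangeDict _ _
  unfold Spec_ReturnRange ReturnRange ReturnRange_alt
  rw [pvGo_start]
  cases hg : pvGoB (mappingDict.length + 2) (pvBuildIdx mappingDict) category false 1 0 1 0 with
  | none => rfl
  | some st =>
    obtain ⟨b, ax, bx, ay, byy⟩ := st
    cases b <;> simp [pvFin, pvApply]
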